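-- pv_equiv track=rewrite | github.com/IBMSpectrumComputing/cloud-provider-plugins | hostProviders/awsv2/src/template_manager.py | _validate_gpuextend
-- ===== SOURCE A (Python) =====
-- from typing import Dict, List, Any, Set
--
-- def _validate_gpuextend(gpuextend: str, template_id: str) -> List[str]:
--     """Validate gpuextend format"""
--     errors = []
--
--     # Split by semicolon and validate each key=value pair
--     pairs = gpuextend.split(';')
--     for pair in pairs:
--         if not pair.strip():
--             continue
--
--         if '=' not in pair:
--             errors.append(f"Template '{template_id}': gpuextend must be in format 'key1=value1;key2=value2;...'")
--             continue
--
--         key, value = pair.split('=', 1)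
--         key = key.strip()
--         value = value.strip()
--
--         valid_keys = ['ngpus', 'nnumas', 'gbrand', 'gmodel', 'gmem', 'nvlink']
--         if key not in valid_keys:
--             errors.append(f"Template '{template_id}': gpuextend key '{key}' is invalid. Valid keys: {valid_keys}")
--             continue
--
--         # Validate specific key values
--         if key == 'ngpus':
--             if not value.isdigit() or int(value) <= 0:
--                 errors.append(f"Template '{template_id}': gpuextend ngpus must be a positive integer")
--         elif key == 'nnumas':
--             if not value.isdigit() or int(value) <= 0:
--                 errors.append(f"Template '{template_id}': gpuextend nnumas must be a positive integer")
--         elif key == 'gmem':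
--             if not value.isdigit() or int(value) <= 0:
--                 errors.append(f"Template '{template_id}': gpuextend gmem must be a positive integer (MB)")
--         elif key == 'nvlink':
--             if value.lower() not in ['y', 'n', 'yes', 'no']:
--                 errors.append(f"Template '{template_id}': gpuextend nvlink must be y, n, yes, or no")
--
--     return errors
-- ===== SOURCE B (Python) =====
-- def _classify(seg):
--     """Parse one ';'-segment into a token (kind, key); no message text here."""
--     if not seg.strip():
--         return ('skip', '')
--     if '=' not in seg:
--         return ('noeq', '')
--     key, value = seg.split('=', 1)
--     key = key.strip()
--     value = value.strip()
--     if key in ('ngpus', 'nnumas', 'gmem'):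
--         return ('ok', '') if value.isdigit() and int(value) > 0 else ('bad', key)
--     if key == 'nvlink':
--         return ('ok', '') if value.lower() in ('y', 'n', 'yes', 'no') else ('bad', key)
--     if key in ('gbrand', 'gmodel'):
--         return ('ok', '')
--     return ('invalid', key)
--
--
-- def _render(tok, template_id):
--     """Turn a token into its error message, or None for valid/blank segments."""
--     kind, key = tok
--     if kind in ('skip', 'ok'):
--         return None
--     if kind == 'noeq':
--         return f"Template '{template_id}': gpuextend must be in format 'key1=value1;key2=value2;...'"
--     if kind == 'invalid':
--         return (f"Template '{template_id}': gpuextend key '{key}' is invalid. "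
--                 f"Valid keys: ['ngpus', 'nnumas', 'gbrand', 'gmodel', 'gmem', 'nvlink']")
--     tails = {
--         'ngpus': 'ngpus must be a positive integer',
--         'nnumas': 'nnumas must be a positive integer',
--         'gmem': 'gmem must be a positive integer (MB)',
--         'nvlink': 'nvlink must be y, n, yes, or no',
--     }
--     return f"Template '{template_id}': gpuextend {tails.get(key, '')}"
--
--
-- def _validate_gpuextend(gpuextend: str, template_id: str):
--     """Validate gpuextend format: staged pipeline tokenize -> render -> filter."""
--     tokens = [_classify(seg) for seg in gpuextend.split(';')]
--     msgs = [_render(tok, template_id) for tok in tokens]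
--     return [m for m in msgs if m is not None]
-- ===== Notes on version B (the rewrite author's own statement) =====
-- stated objective: alternative
-- what changed: Replaces A's single imperative loop (error-list accumulator plus per-key if/elif cascade with inline message strings) by a staged pipeline: a tokenize pass parses every segment into a small token IR (skip/noeq/ok/bad key/invalid key), a separate render pass maps each token to an optional message (per-key texts in a table), and a final filter keeps the messages.
import Mathlib
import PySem

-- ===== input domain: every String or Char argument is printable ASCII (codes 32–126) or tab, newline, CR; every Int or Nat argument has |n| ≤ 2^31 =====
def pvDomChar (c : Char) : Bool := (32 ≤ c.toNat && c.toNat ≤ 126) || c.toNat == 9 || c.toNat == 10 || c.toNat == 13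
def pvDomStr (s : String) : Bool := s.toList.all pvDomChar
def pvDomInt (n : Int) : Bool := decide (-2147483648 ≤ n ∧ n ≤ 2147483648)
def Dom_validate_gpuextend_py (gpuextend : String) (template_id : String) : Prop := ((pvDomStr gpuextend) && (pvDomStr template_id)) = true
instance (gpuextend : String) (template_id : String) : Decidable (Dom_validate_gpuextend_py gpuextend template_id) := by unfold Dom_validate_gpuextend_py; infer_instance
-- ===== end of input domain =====

-- B replaces A's single imperative loop (accumulator + per-key if/elif cascade with inline
-- messages) by a staged pipeline: tokenize every segment into a small IR, render each token
-- to an optional message, filter; same cost, a different decomposition (return value only).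

-- ===== PORT A =====
-- loop body of A's for-loop (errors is the accumulator)
def pvAStep (template_id : String) (errors : List String) (pair : String) : List String :=
  if PySem.Str.strip pair == "" then errors
  else if ¬ (PySem.Str.isIn "=" pair = true) then
    errors ++ ["Template '" ++ template_id ++ "': gpuextend must be in format 'key1=value1;key2=value2;...'"]
  else
    let parts := (PySem.Str.splitMax? pair "=" 1).getD []
    let key := PySem.Str.strip (parts.getD 0 "")
    let value := PySem.Str.strip (parts.getD 1 "")
    let valid_keys := ["ngpus", "nnumas", "gbrand", "gmodel", "gmem", "nvlink"]
    if ¬ (key ∈ valid_keys) then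
      errors ++ ["Template '" ++ template_id ++ "': gpuextend key '" ++ key ++ "' is invalid. Valid keys: ['ngpus', 'nnumas', 'gbrand', 'gmodel', 'gmem', 'nvlink']"]
    else if key == "ngpus" then
      if ¬ (PySem.Str.strIsdigit value = true) ∨ (PySem.Int.ofStr? value).getD 0 ≤ 0 then
        errors ++ ["Template '" ++ template_id ++ "': gpuextend ngpus must be a positive integer"]
      else errors
    else if key == "nnumas" then
      if ¬ (PySem.Str.strIsdigit value = true) ∨ (PySem.Int.ofStr? value).getD 0 ≤ 0 then
        errors ++ ["Template '" ++ template_id ++ "': gpuextend nnumas must be a positive integer"]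
      else errors
    else if key == "gmem" then
      if ¬ (PySem.Str.strIsdigit value = true) ∨ (PySem.Int.ofStr? value).getD 0 ≤ 0 then
        errors ++ ["Template '" ++ template_id ++ "': gpuextend gmem must be a positive integer (MB)"]
      else errors
    else if key == "nvlink" then
      if ¬ (PySem.Str.lower value ∈ ["y", "n", "yes", "no"]) then
        errors ++ ["Template '" ++ template_id ++ "': gpuextend nvlink must be y, n, yes, or no"]
      else errors
    else errors

def validate_gpuextend_py (gpuextend : String) (template_id : String) : List String :=
  ((PySem.Str.split? gpuextend ";").getD []).foldl (pvAStep template_id) []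

-- ===== PORT B =====
-- token IR produced by Source B's _classify: the Python pair (kind, key)
inductive PvTok : Type
  | skip : PvTok
  | noeq : PvTok
  | ok : PvTok
  | bad : String → PvTok
  | invalid : String → PvTok
deriving DecidableEq, Repr

-- Source B's _classify
def pvClassify (seg : String) : PvTok :=
  if PySem.Str.strip seg == "" then .skip
  else if ¬ (PySem.Str.isIn "=" seg = true) then .noeq
  else
    let parts := (PySem.Str.splitMax? seg "=" 1).getD []
    let key := PySem.Str.strip (parts.getD 0 "")
    let value := PySem.Str.strip (parts.getD 1 "")
    if key ∈ ["ngpus", "nnumas", "gmem"] then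
      if PySem.Str.strIsdigit value && decide (0 < (PySem.Int.ofStr? value).getD 0) then .ok else .bad key
    else if key == "nvlink" then
      if PySem.Str.lower value ∈ ["y", "n", "yes", "no"] then .ok else .bad key
    else if key ∈ ["gbrand", "gmodel"] then .ok
    else .invalid key

-- Source B's _render (tails.get(key, '') ported as Dict.get? + getD '')
def pvRender (tok : PvTok) (template_id : String) : Option String :=
  match tok with
  | .skip => none
  | .ok => none
  | .noeq => some ("Template '" ++ template_id ++ "': gpuextend must be in format 'key1=value1;key2=value2;...'")
  | .invalid key => some ("Template '" ++ template_id ++ "': gpuextend key '" ++ key ++ "' is invalid. Valid keys: ['ngpus', 'nnumas', 'gbrand', 'gmodel', 'gmem', 'nvlink']")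
  | .bad key =>
    let tails : PySem.Dict String String := PySem.Dict.ofList
      [ ("ngpus", "ngpus must be a positive integer"),
        ("nnumas", "nnumas must be a positive integer"),
        ("gmem", "gmem must be a positive integer (MB)"),
        ("nvlink", "nvlink must be y, n, yes, or no") ]
    some ("Template '" ++ template_id ++ "': gpuextend " ++ (tails.get? key).getD "")

def validate_gpuextend_py_alt (gpuextend : String) (template_id : String) : List String :=
  let tokens := ((PySem.Str.split? gpuextend ";").getD []).map pvClassify
  let msgs := tokens.map (fun tok => pvRender tok template_id)
  msgs.filterMap id

-- ===== PRECONDITION & SPEC =====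
def Spec_validate_gpuextend_py (gpuextend : String) (template_id : String) (out : List String) : Prop := out = validate_gpuextend_py_alt gpuextend template_id
instance (gpuextend : String) (template_id : String) (out : List String) : Decidable (Spec_validate_gpuextend_py gpuextend template_id out) := by unfold Spec_validate_gpuextend_py; infer_instance

-- ===== CLAIM (what is proved, stated in full; the proofs are below) =====
def Claim_equal_validate_gpuextend_py : Prop := ∀ (gpuextend : String) (template_id : String), Dom_validate_gpuextend_py gpuextend template_id → Spec_validate_gpuextend_py gpuextend template_id (validate_gpuextend_py gpuextend template_id)

-- ===== LEMMAS AND PROOFS =====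

-- value passes the positive-integer test in A's phrasing iff it fails Source B's boolean test
theorem pvPos_iff (v : String) :
    (¬ PySem.Str.strIsdigit v = true ∨ (PySem.Int.ofStr? v).getD 0 ≤ 0) ↔
      ¬ ((PySem.Str.strIsdigit v && decide (0 < (PySem.Int.ofStr? v).getD 0)) = true) := by
  constructor
  · rintro (h | h) <;> simp only [Bool.and_eq_true, decide_eq_true_eq, not_and] <;> intro hd
    · exact absurd hd h
    · omega
  · intro h; by_cases d : PySem.Str.strIsdigit v = true
    · right; simp only [d, Bool.true_and, decide_eq_true_eq, not_lt] at h; omega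
    · left; exact d

-- rendered messages of the 'bad' tokens, with the append tree flattened to A's literals
theorem pvRender_ngpus (t : String) : pvRender (.bad "ngpus") t =
    some ("Template '" ++ t ++ "': gpuextend ngpus must be a positive integer") := by
  show some ("Template '" ++ t ++ "': gpuextend " ++ "ngpus must be a positive integer") = _
  rw [String.append_assoc]; rfl

theorem pvRender_nnumas (t : String) : pvRender (.bad "nnumas") t =
    some ("Template '" ++ t ++ "': gpuextend nnumas must be a positive integer") := by
  show some ("Template '" ++ t ++ "': gpuextend " ++ "nnumas must be a positive integer") = _
  rw [String.append_assoc]; rfl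

theorem pvRender_gmem (t : String) : pvRender (.bad "gmem") t =
    some ("Template '" ++ t ++ "': gpuextend gmem must be a positive integer (MB)") := by
  show some ("Template '" ++ t ++ "': gpuextend " ++ "gmem must be a positive integer (MB)") = _
  rw [String.append_assoc]; rfl

theorem pvRender_nvlink (t : String) : pvRender (.bad "nvlink") t =
    some ("Template '" ++ t ++ "': gpuextend nvlink must be y, n, yes, or no") := by
  show some ("Template '" ++ t ++ "': gpuextend " ++ "nvlink must be y, n, yes, or no") = _
  rw [String.append_assoc]; rfl

-- A's loop body appends exactly the rendered message of B's token for that segment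
theorem pvStep_eq (t : String) (errors : List String) (pair : String) :
    pvAStep t errors pair = errors ++ (pvRender (pvClassify pair) t).toList := by
  unfold pvAStep pvClassify
  by_cases h1 : PySem.Str.strip pair == ""
  · simp [h1, pvRender]
  · simp only [h1, Bool.false_eq_true, if_false]
    by_cases h2 : PySem.Str.isIn "=" pair = true
    · simp only [h2, not_true, if_false]
      set key := PySem.Str.strip (((PySem.Str.splitMax? pair "=" 1).getD []).getD 0 "") with hk
      set value := PySem.Str.strip (((PySem.Str.splitMax? pair "=" 1).getD []).getD 1 "") with hv
      clear_value key value
      by_cases e1 : key = "ngpus"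
      · subst e1
        simp only [show ("ngpus" ∈ ["ngpus", "nnumas", "gbrand", "gmodel", "gmem", "nvlink"]) from by decide,
          show ("ngpus" ∈ ["ngpus", "nnumas", "gmem"]) from by decide, not_true, if_false,
          show (("ngpus" == "ngpus") = true) from by decide, if_pos]
        by_cases b : (PySem.Str.strIsdigit value && decide (0 < (PySem.Int.ofStr? value).getD 0)) = true
        · rw [if_pos b, if_neg (fun f => (pvPos_iff value).mp f b)]; simp [pvRender]
        · rw [if_neg b, if_pos ((pvPos_iff value).mpr b), pvRender_ngpus]; simp
      · by_cases e2 : key = "nnumas"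
        · subst e2
          simp only [show ("nnumas" ∈ ["ngpus", "nnumas", "gbrand", "gmodel", "gmem", "nvlink"]) from by decide,
            show ("nnumas" ∈ ["ngpus", "nnumas", "gmem"]) from by decide, not_true, if_false,
            show (("nnumas" == "ngpus") = false) from by decide, Bool.false_eq_true,
            show (("nnumas" == "nnumas") = true) from by decide, if_pos]
          by_cases b : (PySem.Str.strIsdigit value && decide (0 < (PySem.Int.ofStr? value).getD 0)) = true
          · rw [if_pos b, if_neg (fun f => (pvPos_iff value).mp f b)]; simp [pvRender]
          · rw [if_neg b, if_pos ((pvPos_iff value).mpr b), pvRender_nnumas]; simp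
        · by_cases e5 : key = "gmem"
          · subst e5
            simp only [show ("gmem" ∈ ["ngpus", "nnumas", "gbrand", "gmodel", "gmem", "nvlink"]) from by decide,
              show ("gmem" ∈ ["ngpus", "nnumas", "gmem"]) from by decide, not_true, if_false,
              show (("gmem" == "ngpus") = false) from by decide, Bool.false_eq_true,
              show (("gmem" == "nnumas") = false) from by decide,
              show (("gmem" == "gmem") = true) from by decide, if_pos]
            by_cases b : (PySem.Str.strIsdigit value && decide (0 < (PySem.Int.ofStr? value).getD 0)) = true
            · rw [if_pos b, if_neg (fun f => (pvPos_iff value).mp f b)]; simp [pvRender]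
            · rw [if_neg b, if_pos ((pvPos_iff value).mpr b), pvRender_gmem]; simp
          · by_cases e6 : key = "nvlink"
            · subst e6
              simp only [show ("nvlink" ∈ ["ngpus", "nnumas", "gbrand", "gmodel", "gmem", "nvlink"]) from by decide,
                show ("nvlink" ∈ ["ngpus", "nnumas", "gmem"]) = False from by decide, not_true, if_false,
                show (("nvlink" == "ngpus") = false) from by decide, Bool.false_eq_true,
                show (("nvlink" == "nnumas") = false) from by decide,
                show (("nvlink" == "gmem") = false) from by decide,
                show (("nvlink" == "nvlink") = true) from by decide, if_pos, if_false]
              by_cases m : PySem.Str.lower value ∈ (["y", "n", "yes", "no"] : List String)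
              · rw [if_neg (not_not.mpr m), if_pos (by simpa using m)]; simp [pvRender]
              · rw [if_pos m, if_neg (by simpa using m), pvRender_nvlink]; simp
            · by_cases e3 : key = "gbrand"
              · subst e3; simp [pvRender]
              · by_cases e4 : key = "gmodel"
                · subst e4; simp [pvRender]
                · rw [if_pos (by simp [e1, e2, e3, e4, e5, e6]),
                    if_neg (by simp [e1, e2, e5]), if_neg (by simp [e6]),
                    if_neg (by simp [e3, e4])]
                  simp [pvRender]
    · rw [if_pos h2, if_pos h2]
      simp [pvRender]

-- A's whole fold is the tokenize→render→filter pipeline, for any accumulator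
theorem pvFoldl_eq (t : String) (l : List String) (acc : List String) :
    l.foldl (pvAStep t) acc = acc ++ ((l.map pvClassify).map (fun tok => pvRender tok t)).filterMap id := by
  induction l generalizing acc with
  | nil => simp
  | cons p l ih =>
    simp only [List.foldl_cons, List.map_cons, List.filterMap_cons, pvStep_eq, ih]
    cases pvRender (pvClassify p) t <;> simp

-- ===== VERDICT (by name: the statement is the Claim_ definition above) =====
theorem validate_gpuextend_py_spec : Claim_equal_validate_gpuextend_py := by
  intro g t _
  unfold Spec_validate_gpuextend_py validate_gpuextend_py validate_gpuextend_py_alt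
  simpa using pvFoldl_eq t ((PySem.Str.split? g ";").getD []) []
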